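-- pv_equiv track=rewrite | github.com/chejn20/internship | test1206.py | length_combination
-- ===== SOURCE A (Python) =====
-- MIN_LENGTH = 18
--
-- MAX_LENGTH = 50
--
-- def length_combination(len_building=None):
--     # Calculation length combination
--     if len_building is None:
--         len_building = [7, 9, 11, 15]
--     res = set()
--     for i in len_building:
--         for j in len_building:
--             if MIN_LENGTH < i + j < MAX_LENGTH:
--                 res.add(i + j)
--             for k in len_building:
--                 if MIN_LENGTH < i + j + k < MAX_LENGTH:
--                     res.add(i + j + k)
--                 for l in len_building:
--                     if MIN_LENGTH < i + j + k + l < MAX_LENGTH: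
--                         res.add(i + j + k + l)
--     return sorted(res)
-- ===== SOURCE B (Python) =====
-- MIN_LENGTH = 18
--
-- MAX_LENGTH = 50
--
-- def length_combination(len_building=None):
--     # O(n^2): the answer window (MIN_LENGTH, MAX_LENGTH) holds only 31 integers,
--     # so build the set of pairwise sums once and probe each candidate target.
--     if len_building is None:
--         len_building = [7, 9, 11, 15]
--     vals = set(len_building)
--     pair = {a + b for a in vals for b in vals}
--     res = {s for s in pair if MIN_LENGTH < s < MAX_LENGTH}
--     res |= {t for t in range(MIN_LENGTH + 1, MAX_LENGTH)
--             if any(t - x in pair for x in vals)}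
--     res |= {t for t in range(MIN_LENGTH + 1, MAX_LENGTH)
--             if any(t - p in pair for p in pair)}
--     return sorted(res)
-- ===== Notes on version B (the rewrite author's own statement) =====
-- stated objective: faster
-- what changed: Replaces the quadruple nested loop over elements by building the set of pairwise sums once and probing the 31 integer targets of the open window (18,50) against it (t is a 3-sum iff t-x is a pairwise sum, a 4-sum iff t-p is for a pairwise sum p).
import Mathlib
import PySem

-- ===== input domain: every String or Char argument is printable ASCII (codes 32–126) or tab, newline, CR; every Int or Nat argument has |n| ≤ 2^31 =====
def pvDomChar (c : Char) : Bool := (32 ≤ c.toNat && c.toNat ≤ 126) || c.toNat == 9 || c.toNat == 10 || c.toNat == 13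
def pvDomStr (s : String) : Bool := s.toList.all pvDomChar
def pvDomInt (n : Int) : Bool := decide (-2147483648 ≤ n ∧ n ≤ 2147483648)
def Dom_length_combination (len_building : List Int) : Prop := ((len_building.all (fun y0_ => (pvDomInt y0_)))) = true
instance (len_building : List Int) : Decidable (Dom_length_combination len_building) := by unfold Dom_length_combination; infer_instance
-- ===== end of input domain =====

-- B replaces A's quadruple loop by a pairwise-sum set probed at the 31 window targets: O(n^2) instead of O(n^4); proved to return the same list.

def MIN_LENGTH : Int := 18
def MAX_LENGTH : Int := 50

-- ===== PORT A =====
def length_combination (len_building : List Int) : List Int :=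
  let res : PySem.Set Int :=
    len_building.foldl (fun res i =>
      len_building.foldl (fun res j =>
        let res := if MIN_LENGTH < i + j ∧ i + j < MAX_LENGTH then PySem.Set.add res (i + j) else res
        len_building.foldl (fun res k =>
          let res := if MIN_LENGTH < i + j + k ∧ i + j + k < MAX_LENGTH then PySem.Set.add res (i + j + k) else res
          len_building.foldl (fun res l =>
            if MIN_LENGTH < i + j + k + l ∧ i + j + k + l < MAX_LENGTH then PySem.Set.add res (i + j + k + l) else res
          ) res
        ) res
      ) res
    ) PySem.Set.empty
  PySem.List.sorted res (fun x => x) false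

-- ===== PORT B =====
def length_combination_alt (len_building : List Int) : List Int :=
  let vals : PySem.Set Int := PySem.Set.ofList len_building
  let pair : PySem.Set Int :=
    vals.foldl (fun acc a => vals.foldl (fun acc b => PySem.Set.add acc (a + b)) acc) PySem.Set.empty
  let res : PySem.Set Int :=
    PySem.Set.ofList (pair.filter (fun s => decide (MIN_LENGTH < s ∧ s < MAX_LENGTH)))
  let res := PySem.Set.union res
    ((PySem.List.pyRange (MIN_LENGTH + 1) MAX_LENGTH 1).filter
      (fun t => vals.any (fun x => PySem.Set.contains pair (t - x))))
  let res := PySem.Set.union res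
    ((PySem.List.pyRange (MIN_LENGTH + 1) MAX_LENGTH 1).filter
      (fun t => pair.any (fun p => PySem.Set.contains pair (t - p))))
  PySem.List.sorted res (fun x => x) false

-- ===== PRECONDITION & SPEC =====
def Spec_length_combination (len_building : List Int) (out : List Int) : Prop := out = length_combination_alt len_building
instance (len_building : List Int) (out : List Int) : Decidable (Spec_length_combination len_building out) := by unfold Spec_length_combination; infer_instance

-- ===== CLAIM (what is proved, stated in full; the proofs are below) =====
def Claim_equal_length_combination : Prop := ∀ (len_building : List Int), Dom_length_combination len_building → Spec_length_combination len_building (length_combination len_building)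

-- ===== LEMMAS AND PROOFS =====

-- membership through a guarded add
theorem mem_ifadd (r : List Int) (c s : Int) :
    (s ∈ if MIN_LENGTH < c ∧ c < MAX_LENGTH then PySem.Set.add r c else r)
    ↔ s ∈ r ∨ (s = c ∧ MIN_LENGTH < s ∧ s < MAX_LENGTH) := by
  by_cases h : MIN_LENGTH < c ∧ c < MAX_LENGTH
  · simp only [if_pos h, PySem.Set.mem_add]
    constructor
    · rintro (hs | rfl)
      · exact Or.inl hs
      · exact Or.inr ⟨rfl, h.1, h.2⟩
    · rintro (hs | ⟨rfl, _, _⟩)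
      · exact Or.inl hs
      · exact Or.inr rfl
  · simp only [if_neg h]
    constructor
    · exact Or.inl
    · rintro (hs | ⟨rfl, h1, h2⟩)
      · exact hs
      · exact absurd ⟨h1, h2⟩ h

-- a fold that only ever adds preserves Nodup
theorem nodup_foldl_pres {α β : Type} (f : List α → β → List α)
    (h : ∀ acc x, acc.Nodup → (f acc x).Nodup) :
    ∀ (xs : List β) (acc : List α), acc.Nodup → (xs.foldl f acc).Nodup := by
  intro xs
  induction xs with
  | nil => intro acc hacc; simpa using hacc
  | cons x xs ih => intro acc hacc; exact ih _ (h _ _ hacc)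

theorem nodup_ifadd (r : List Int) (c : Int) (h : r.Nodup) :
    (if MIN_LENGTH < c ∧ c < MAX_LENGTH then PySem.Set.add r c else r).Nodup := by
  split
  · exact PySem.Set.nodup_add _ _ h
  · exact h

-- membership through the innermost loop of A
theorem mem_fold4 (xs : List Int) (c : Int) :
    ∀ (acc : List Int) (s : Int),
    s ∈ xs.foldl (fun r l => if MIN_LENGTH < c + l ∧ c + l < MAX_LENGTH then PySem.Set.add r (c + l) else r) acc
    ↔ s ∈ acc ∨ ∃ l ∈ xs, s = c + l ∧ MIN_LENGTH < s ∧ s < MAX_LENGTH := by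
  induction xs with
  | nil => simp
  | cons y ys ih =>
    intro acc s
    simp only [List.foldl_cons, ih, mem_ifadd, List.mem_cons]
    constructor
    · rintro ((hs | ⟨rfl, hlo, hhi⟩) | ⟨l, hl, rfl, hlo, hhi⟩)
      · exact Or.inl hs
      · exact Or.inr ⟨y, Or.inl rfl, rfl, hlo, hhi⟩
      · exact Or.inr ⟨l, Or.inr hl, rfl, hlo, hhi⟩
    · rintro (hs | ⟨l, (rfl | hl), rfl, hlo, hhi⟩)
      · exact Or.inl (Or.inl hs)
      · exact Or.inl (Or.inr ⟨rfl, hlo, hhi⟩)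
      · exact Or.inr ⟨l, hl, rfl, hlo, hhi⟩

theorem nodup_fold4 (xs : List Int) (c : Int) (acc : List Int) (h : acc.Nodup) :
    (xs.foldl (fun r l => if MIN_LENGTH < c + l ∧ c + l < MAX_LENGTH then PySem.Set.add r (c + l) else r) acc).Nodup := by
  refine nodup_foldl_pres _ ?_ xs acc h
  intro acc x hacc
  exact nodup_ifadd _ _ hacc

-- membership through A's k-loop (c = i + j)
theorem mem_fold3 (inner : List Int) (c : Int) :
    ∀ (ys acc : List Int) (s : Int),
    s ∈ ys.foldl (fun r k =>
          inner.foldl (fun r l => if MIN_LENGTH < c + k + l ∧ c + k + l < MAX_LENGTH then PySem.Set.add r (c + k + l) else r)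
            (if MIN_LENGTH < c + k ∧ c + k < MAX_LENGTH then PySem.Set.add r (c + k) else r)) acc
    ↔ s ∈ acc ∨ ∃ k ∈ ys, (s = c + k ∧ MIN_LENGTH < s ∧ s < MAX_LENGTH) ∨
        ∃ l ∈ inner, s = c + k + l ∧ MIN_LENGTH < s ∧ s < MAX_LENGTH := by
  intro ys
  induction ys with
  | nil => simp
  | cons y ys ih =>
    intro acc s
    simp only [List.foldl_cons, ih, mem_fold4, mem_ifadd, List.mem_cons]
    constructor
    · rintro (((hs | ⟨rfl, hlo, hhi⟩) | ⟨l, hl, rfl, hlo, hhi⟩) | ⟨k, hk, h⟩)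
      · exact Or.inl hs
      · exact Or.inr ⟨y, Or.inl rfl, Or.inl ⟨rfl, hlo, hhi⟩⟩
      · exact Or.inr ⟨y, Or.inl rfl, Or.inr ⟨l, hl, rfl, hlo, hhi⟩⟩
      · exact Or.inr ⟨k, Or.inr hk, h⟩
    · rintro (hs | ⟨k, (rfl | hk), h⟩)
      · exact Or.inl (Or.inl (Or.inl hs))
      · rcases h with ⟨rfl, hlo, hhi⟩ | ⟨l, hl, h2⟩
        · exact Or.inl (Or.inl (Or.inr ⟨rfl, hlo, hhi⟩))
        · exact Or.inl (Or.inr ⟨l, hl, h2⟩)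
      · exact Or.inr ⟨k, hk, h⟩

theorem nodup_fold3 (inner : List Int) (c : Int) (ys acc : List Int) (h : acc.Nodup) :
    (ys.foldl (fun r k =>
        inner.foldl (fun r l => if MIN_LENGTH < c + k + l ∧ c + k + l < MAX_LENGTH then PySem.Set.add r (c + k + l) else r)
          (if MIN_LENGTH < c + k ∧ c + k < MAX_LENGTH then PySem.Set.add r (c + k) else r)) acc).Nodup := by
  refine nodup_foldl_pres _ ?_ ys acc h
  intro acc k hacc
  exact nodup_fold4 _ _ _ (nodup_ifadd _ _ hacc)

-- body of A's j-loop, abbreviated for the statements below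
def aBody (inner : List Int) (i : Int) (r : List Int) (j : Int) : List Int :=
  inner.foldl (fun r k =>
    inner.foldl (fun r l => if MIN_LENGTH < i + j + k + l ∧ i + j + k + l < MAX_LENGTH then PySem.Set.add r (i + j + k + l) else r)
      (if MIN_LENGTH < i + j + k ∧ i + j + k < MAX_LENGTH then PySem.Set.add r (i + j + k) else r))
    (if MIN_LENGTH < i + j ∧ i + j < MAX_LENGTH then PySem.Set.add r (i + j) else r)

theorem mem_aBody (inner : List Int) (i j : Int) (acc : List Int) (s : Int) :
    s ∈ aBody inner i acc j
    ↔ s ∈ acc ∨ (s = i + j ∧ MIN_LENGTH < s ∧ s < MAX_LENGTH) ∨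
        ∃ k ∈ inner, (s = i + j + k ∧ MIN_LENGTH < s ∧ s < MAX_LENGTH) ∨
          ∃ l ∈ inner, s = i + j + k + l ∧ MIN_LENGTH < s ∧ s < MAX_LENGTH := by
  simp only [aBody]
  rw [mem_fold3 inner (i + j), mem_ifadd]
  exact or_assoc

theorem nodup_aBody (inner : List Int) (i j : Int) (acc : List Int) (h : acc.Nodup) :
    (aBody inner i acc j).Nodup := by
  simp only [aBody]
  exact nodup_fold3 _ _ _ _ (nodup_ifadd _ _ h)

theorem mem_fold2 (inner : List Int) (i : Int) :
    ∀ (ys acc : List Int) (s : Int),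
    s ∈ ys.foldl (aBody inner i) acc
    ↔ s ∈ acc ∨ ∃ j ∈ ys, (s = i + j ∧ MIN_LENGTH < s ∧ s < MAX_LENGTH) ∨
        ∃ k ∈ inner, (s = i + j + k ∧ MIN_LENGTH < s ∧ s < MAX_LENGTH) ∨
          ∃ l ∈ inner, s = i + j + k + l ∧ MIN_LENGTH < s ∧ s < MAX_LENGTH := by
  intro ys
  induction ys with
  | nil => simp
  | cons y ys ih =>
    intro acc s
    simp only [List.foldl_cons, ih, mem_aBody, List.mem_cons]
    constructor
    · rintro ((hs | h) | ⟨j, hj, h⟩)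
      · exact Or.inl hs
      · exact Or.inr ⟨y, Or.inl rfl, h⟩
      · exact Or.inr ⟨j, Or.inr hj, h⟩
    · rintro (hs | ⟨j, (rfl | hj), h⟩)
      · exact Or.inl (Or.inl hs)
      · exact Or.inl (Or.inr h)
      · exact Or.inr ⟨j, hj, h⟩

theorem nodup_fold2 (inner : List Int) (i : Int) (ys acc : List Int) (h : acc.Nodup) :
    (ys.foldl (aBody inner i) acc).Nodup := by
  refine nodup_foldl_pres _ ?_ ys acc h
  intro acc j hacc
  exact nodup_aBody _ _ _ _ hacc

-- A's full accumulated set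
def aSet (xs : List Int) : List Int :=
  xs.foldl (fun r i => xs.foldl (aBody xs i) r) PySem.Set.empty

theorem mem_fold1 (xs : List Int) :
    ∀ (ys acc : List Int) (s : Int),
    s ∈ ys.foldl (fun r i => xs.foldl (aBody xs i) r) acc
    ↔ s ∈ acc ∨ ∃ i ∈ ys, ∃ j ∈ xs, (s = i + j ∧ MIN_LENGTH < s ∧ s < MAX_LENGTH) ∨
        ∃ k ∈ xs, (s = i + j + k ∧ MIN_LENGTH < s ∧ s < MAX_LENGTH) ∨
          ∃ l ∈ xs, s = i + j + k + l ∧ MIN_LENGTH < s ∧ s < MAX_LENGTH := by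
  intro ys
  induction ys with
  | nil => simp
  | cons y ys ih =>
    intro acc s
    simp only [List.foldl_cons, ih, mem_fold2, List.mem_cons]
    constructor
    · rintro ((hs | h) | ⟨i, hi, h⟩)
      · exact Or.inl hs
      · exact Or.inr ⟨y, Or.inl rfl, h⟩
      · exact Or.inr ⟨i, Or.inr hi, h⟩
    · rintro (hs | ⟨i, (rfl | hi), h⟩)
      · exact Or.inl (Or.inl hs)
      · exact Or.inl (Or.inr h)
      · exact Or.inr ⟨i, hi, h⟩

theorem mem_aSet (xs : List Int) (s : Int) :
    s ∈ aSet xs ↔ ∃ i ∈ xs, ∃ j ∈ xs, (s = i + j ∧ MIN_LENGTH < s ∧ s < MAX_LENGTH) ∨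
        ∃ k ∈ xs, (s = i + j + k ∧ MIN_LENGTH < s ∧ s < MAX_LENGTH) ∨
          ∃ l ∈ xs, s = i + j + k + l ∧ MIN_LENGTH < s ∧ s < MAX_LENGTH := by
  rw [aSet, mem_fold1]
  simp [PySem.Set.empty]

theorem nodup_aSet (xs : List Int) : (aSet xs).Nodup := by
  refine nodup_foldl_pres _ ?_ xs PySem.Set.empty (by simp [PySem.Set.empty])
  intro acc i hacc
  exact nodup_fold2 _ _ _ _ hacc

-- B's pairwise-sum set and its membership
def pairSet (xs : List Int) : List Int :=
  (PySem.Set.ofList xs).foldl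
    (fun acc a => (PySem.Set.ofList xs).foldl (fun acc b => PySem.Set.add acc (a + b)) acc)
    PySem.Set.empty

theorem mem_foldAdd (c : Int) :
    ∀ (ys acc : List Int) (s : Int),
    s ∈ ys.foldl (fun acc b => PySem.Set.add acc (c + b)) acc ↔ s ∈ acc ∨ ∃ b ∈ ys, s = c + b := by
  intro ys
  induction ys with
  | nil => simp
  | cons y ys ih =>
    intro acc s
    simp only [List.foldl_cons, ih, PySem.Set.mem_add, List.mem_cons]
    constructor
    · rintro (⟨hs | rfl⟩ | ⟨b, hb, rfl⟩)
      · exact Or.inl hs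
      · exact Or.inr ⟨y, Or.inl rfl, rfl⟩
      · exact Or.inr ⟨b, Or.inr hb, rfl⟩
    · rintro (hs | ⟨b, (rfl | hb), rfl⟩)
      · exact Or.inl (Or.inl hs)
      · exact Or.inl (Or.inr rfl)
      · exact Or.inr ⟨b, hb, rfl⟩

theorem mem_foldPair (zs : List Int) :
    ∀ (ys acc : List Int) (s : Int),
    s ∈ ys.foldl (fun acc a => zs.foldl (fun acc b => PySem.Set.add acc (a + b)) acc) acc
    ↔ s ∈ acc ∨ ∃ a ∈ ys, ∃ b ∈ zs, s = a + b := by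
  intro ys
  induction ys with
  | nil => simp
  | cons y ys ih =>
    intro acc s
    simp only [List.foldl_cons, ih, mem_foldAdd, List.mem_cons]
    constructor
    · rintro ((hs | ⟨b, hb, rfl⟩) | ⟨a, ha, h⟩)
      · exact Or.inl hs
      · exact Or.inr ⟨y, Or.inl rfl, b, hb, rfl⟩
      · exact Or.inr ⟨a, Or.inr ha, h⟩
    · rintro (hs | ⟨a, (rfl | ha), h⟩)
      · exact Or.inl (Or.inl hs)
      · exact Or.inl (Or.inr h)
      · exact Or.inr ⟨a, ha, h⟩

theorem mem_pairSet (xs : List Int) (s : Int) :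
    s ∈ pairSet xs ↔ ∃ a ∈ xs, ∃ b ∈ xs, s = a + b := by
  rw [pairSet, mem_foldPair]
  simp [PySem.Set.empty, PySem.Set.mem_ofList]

-- B's accumulated set before sorting
def bSet (xs : List Int) : List Int :=
  PySem.Set.union
    (PySem.Set.union
      (PySem.Set.ofList ((pairSet xs).filter (fun s => decide (MIN_LENGTH < s ∧ s < MAX_LENGTH))))
      ((PySem.List.pyRange (MIN_LENGTH + 1) MAX_LENGTH 1).filter
        (fun t => (PySem.Set.ofList xs).any (fun x => PySem.Set.contains (pairSet xs) (t - x)))))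
    ((PySem.List.pyRange (MIN_LENGTH + 1) MAX_LENGTH 1).filter
      (fun t => (pairSet xs).any (fun p => PySem.Set.contains (pairSet xs) (t - p))))

theorem length_combination_alt_eq (xs : List Int) :
    length_combination_alt xs = PySem.List.sorted (bSet xs) (fun x => x) false := rfl

theorem mem_bSet (xs : List Int) (s : Int) :
    s ∈ bSet xs ↔
      (s ∈ pairSet xs ∧ MIN_LENGTH < s ∧ s < MAX_LENGTH) ∨
      ((MIN_LENGTH < s ∧ s < MAX_LENGTH) ∧ ∃ x ∈ xs, s - x ∈ pairSet xs) ∨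
      ((MIN_LENGTH < s ∧ s < MAX_LENGTH) ∧ ∃ p ∈ pairSet xs, s - p ∈ pairSet xs) := by
  have hrange : ∀ t : Int, t ∈ PySem.List.pyRange (MIN_LENGTH + 1) MAX_LENGTH 1 ↔ MIN_LENGTH < t ∧ t < MAX_LENGTH := by
    intro t
    rw [PySem.List.mem_pyRange_one]
    simp only [MIN_LENGTH, MAX_LENGTH]
    omega
  simp only [bSet, PySem.Set.mem_union, PySem.Set.mem_ofList, List.mem_filter, hrange,
    List.any_eq_true, PySem.Set.contains_iff, decide_eq_true_eq]
  exact or_assoc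

theorem nodup_bSet (xs : List Int) : (bSet xs).Nodup :=
  PySem.Set.nodup_union _ _ (PySem.Set.nodup_union _ _ (PySem.Set.nodup_ofList _))

-- the two accumulated sets hold the same elements
theorem mem_aSet_iff_mem_bSet (xs : List Int) (s : Int) : s ∈ aSet xs ↔ s ∈ bSet xs := by
  rw [mem_aSet, mem_bSet]
  simp only [mem_pairSet]
  constructor
  · rintro ⟨i, hi, j, hj, ⟨rfl, hlo, hhi⟩ | ⟨k, hk, ⟨rfl, hlo, hhi⟩ | ⟨l, hl, rfl, hlo, hhi⟩⟩⟩
    · exact Or.inl ⟨⟨i, hi, j, hj, rfl⟩, hlo, hhi⟩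
    · exact Or.inr (Or.inl ⟨⟨hlo, hhi⟩, k, hk, i, hi, j, hj, by ring⟩)
    · exact Or.inr (Or.inr ⟨⟨hlo, hhi⟩, i + j, ⟨i, hi, j, hj, rfl⟩, k, hk, l, hl, by ring⟩)
  · rintro (⟨⟨a, ha, b, hb, rfl⟩, hlo, hhi⟩ | ⟨⟨hlo, hhi⟩, x, hx, a, ha, b, hb, hs⟩ |
      ⟨⟨hlo, hhi⟩, p, ⟨a, ha, b, hb, rfl⟩, c, hc, d, hd, hs⟩)
    · exact ⟨a, ha, b, hb, Or.inl ⟨rfl, hlo, hhi⟩⟩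
    · exact ⟨a, ha, b, hb, Or.inr ⟨x, hx, Or.inl ⟨by linarith, hlo, hhi⟩⟩⟩
    · exact ⟨a, ha, b, hb, Or.inr ⟨c, hc, Or.inr ⟨d, hd, by linarith, hlo, hhi⟩⟩⟩

-- ===== VERDICT (by name: the statement is the Claim_ definition above) =====
theorem length_combination_spec : Claim_equal_length_combination := by
  intro xs _
  unfold Spec_length_combination
  rw [length_combination_alt_eq]
  have hAB : (aSet xs).Perm (bSet xs) :=
    (List.perm_ext_iff_of_nodup (nodup_aSet xs) (nodup_bSet xs)).mpr (mem_aSet_iff_mem_bSet xs)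
  have ha : length_combination xs = PySem.List.sorted (aSet xs) (fun x => x) false := rfl
  rw [ha]
  exact PySem.List.sorted_eq_sorted_of_perm _ _ _ (fun a b h => h) hAB
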